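-- pv_equiv track=rewrite | github.com/davi708/tcc2 | TCC2.py | formatar_sponto_tug
-- ===== SOURCE A (Python) =====
-- from collections import Counter, defaultdict
-- from typing import Any, Dict, List, Tuple
--
-- def formatar_sponto_tug(potencias: List[int]) -> str:
--     if not potencias:
--         return "-"
--
--     contagem = Counter(potencias)
--     partes = []
--     for va in sorted(contagem.keys(), reverse=True):
--         partes.append(f"{contagem[va]} de {va}")
--     return " e ".join(partes)
-- ===== SOURCE B (Python) =====
-- def formatar_sponto_tug(potencias):
--     if not potencias:
--         return "-"
--     ys = sorted(potencias, reverse=True)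
--     partes = []
--     cur = ys[0]
--     cnt = 1
--     for v in ys[1:]:
--         if v == cur:
--             cnt += 1
--         else:
--             partes.append(f"{cnt} de {cur}")
--             cur = v
--             cnt = 1
--     partes.append(f"{cnt} de {cur}")
--     return " e ".join(partes)
-- ===== Notes on version B (the rewrite author's own statement) =====
-- stated objective: alternative
-- what changed: Replaces the Counter dictionary plus a sort of its keys by a single descending sort of the list followed by a run-length scan grouping consecutive equal values.
import Mathlib
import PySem

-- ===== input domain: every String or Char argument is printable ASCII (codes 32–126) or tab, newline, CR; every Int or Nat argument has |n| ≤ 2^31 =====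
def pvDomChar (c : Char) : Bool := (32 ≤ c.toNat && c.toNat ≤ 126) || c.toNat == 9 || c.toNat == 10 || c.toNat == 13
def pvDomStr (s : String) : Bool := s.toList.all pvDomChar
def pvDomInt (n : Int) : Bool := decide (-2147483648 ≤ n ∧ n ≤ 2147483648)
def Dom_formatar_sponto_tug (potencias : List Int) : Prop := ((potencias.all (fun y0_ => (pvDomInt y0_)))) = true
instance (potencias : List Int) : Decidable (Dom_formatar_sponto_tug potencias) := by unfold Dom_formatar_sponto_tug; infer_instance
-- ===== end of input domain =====

-- B replaces A's Counter + sort-of-keys by a descending sort followed by a run-length scan (alternative decomposition, same cost).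

-- ===== PORT A =====
-- Counter(potencias), then "{count} de {va}" for va over the keys sorted descending, joined by " e ".
def formatar_sponto_tug (potencias : List Int) : String :=
  if potencias = [] then "-"
  else
    let contagem := PySem.Dict.counter potencias
    let partes : List String :=
      (PySem.List.sorted contagem.keys (fun x => x) true).foldl
        (fun acc va => acc ++ [PySem.Int.toStr (contagem.getD va 0) ++ " de " ++ PySem.Int.toStr va]) []
    PySem.Str.join " e " partes

-- ===== PORT B =====
-- the for-loop of Source B over ys[1:], state (parts, cur, cnt)
def pvRunsLoop (cur cnt : Int) (parts : List String) : List Int → List String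
  | [] => parts ++ [PySem.Int.toStr cnt ++ " de " ++ PySem.Int.toStr cur]
  | v :: rest =>
      if v = cur then pvRunsLoop cur (cnt + 1) parts rest
      else pvRunsLoop v 1 (parts ++ [PySem.Int.toStr cnt ++ " de " ++ PySem.Int.toStr cur]) rest

-- sort descending, then run-length scan grouping consecutive equal values
def formatar_sponto_tug_alt (potencias : List Int) : String :=
  if potencias = [] then "-"
  else
    match PySem.List.sorted potencias (fun x => x) true with
    | [] => "-"  -- unreachable: sorted of a nonempty list is nonempty
    | y :: t => PySem.Str.join " e " (pvRunsLoop y 1 [] t)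

-- ===== PRECONDITION & SPEC =====
def Spec_formatar_sponto_tug (potencias : List Int) (out : String) : Prop := out = formatar_sponto_tug_alt potencias
instance (potencias : List Int) (out : String) : Decidable (Spec_formatar_sponto_tug potencias out) := by unfold Spec_formatar_sponto_tug; infer_instance

-- ===== CLAIM (what is proved, stated in full; the proofs are below) =====
def Claim_equal_formatar_sponto_tug : Prop := ∀ (potencias : List Int), Dom_formatar_sponto_tug potencias → Spec_formatar_sponto_tug potencias (formatar_sponto_tug potencias)

-- ===== LEMMAS AND PROOFS =====

-- dedup drops an immediately repeated head
lemma pvDedup_cons_self (v : Int) (rest : List Int) :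
    PySem.List.dedup (v :: v :: rest) = PySem.List.dedup (v :: rest) := by
  simp [PySem.List.dedup, PySem.Set.ofList, PySem.Set.add, PySem.Set.empty]

lemma pvFoldl_add_cons (cur : Int) (t : List Int) : ∀ (acc : List Int), cur ∉ t →
    List.foldl PySem.Set.add (cur :: acc) t = cur :: List.foldl PySem.Set.add acc t := by
  induction t with
  | nil => intro acc _; rfl
  | cons x t' ih =>
      intro acc h
      have hx : x ≠ cur := fun he => h (by simp [he])
      have hadd : PySem.Set.add (cur :: acc) x = cur :: PySem.Set.add acc x := by
        simp [PySem.Set.add, hx]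
        split_ifs <;> simp
      rw [List.foldl_cons, hadd, List.foldl_cons, ih _ (fun hm => h (by simp [hm]))]

-- dedup of a fresh head is the head consed on the dedup of the tail
lemma pvDedup_cons_of_not_mem (cur : Int) (t : List Int) (h : cur ∉ t) :
    PySem.List.dedup (cur :: t) = cur :: PySem.List.dedup t := by
  simp only [PySem.List.dedup, PySem.Set.ofList, List.foldl_cons]
  have he : PySem.Set.add PySem.Set.empty cur = [cur] := rfl
  rw [he]
  exact pvFoldl_add_cons cur t [] h

lemma pvFoldl_add_sublist (xs : List Int) : ∀ (acc : List Int),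
    (List.foldl PySem.Set.add acc xs).Sublist (acc ++ xs) := by
  induction xs with
  | nil => intro acc; simp
  | cons x xs ih =>
      intro acc
      rw [List.foldl_cons]
      refine (ih (PySem.Set.add acc x)).trans ?_
      unfold PySem.Set.add
      split_ifs
      · exact List.Sublist.append_left (List.sublist_cons_self x xs) acc
      · rw [List.append_assoc, List.singleton_append]

-- dedup is a sublist of its argument
lemma pvDedup_sublist (xs : List Int) : (PySem.List.dedup xs).Sublist xs := by
  simpa using pvFoldl_add_sublist xs []

-- closed form of the run-length loop on a descending list
lemma pvRunsLoop_eq (t : List Int) : ∀ (cur cnt : Int) (parts : List String),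
    (cur :: t).Pairwise (fun a b => b ≤ a) →
    pvRunsLoop cur cnt parts t =
      parts ++ (PySem.List.dedup (cur :: t)).map
        (fun w => PySem.Int.toStr ((if w = cur then cnt else 0) + (t.count w : Int)) ++ " de " ++ PySem.Int.toStr w) := by
  induction t with
  | nil =>
      intro cur cnt parts _
      simp [pvRunsLoop, PySem.List.dedup, PySem.Set.ofList, PySem.Set.add, PySem.Set.empty]
  | cons v rest ih =>
      intro cur cnt parts hp
      have hp' : (v :: rest).Pairwise (fun a b => b ≤ a) := hp.sublist (by simp)
      by_cases hvc : v = cur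
      · subst hvc
        rw [pvRunsLoop, if_pos rfl, ih v (cnt + 1) parts hp', pvDedup_cons_self]
        congr 1
        apply List.map_congr_left
        intro w _
        by_cases hwv : w = v
        · subst hwv
          simp only [if_true, List.count_cons_self, Nat.cast_add, Nat.cast_one]
          have harg : cnt + 1 + (rest.count w : Int) = cnt + ((rest.count w : Int) + 1) := by ring
          rw [harg]
        · simp only [if_neg hwv, List.count_cons_of_ne (fun h => hwv h.symm)]
      · rw [pvRunsLoop, if_neg hvc,
            ih v 1 (parts ++ [PySem.Int.toStr cnt ++ " de " ++ PySem.Int.toStr cur]) hp']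
        -- cur does not occur in v :: rest: everything there is ≤ v < cur
        have hcur_not : cur ∉ v :: rest := by
          intro hmem
          have hle : ∀ b ∈ v :: rest, b ≤ cur := (List.pairwise_cons.mp hp).1
          have hvlt : v < cur := lt_of_le_of_ne (hle v (by simp)) hvc
          rcases List.mem_cons.mp hmem with he | hm
          · exact hvc he.symm
          · exact absurd ((List.pairwise_cons.mp hp').1 cur hm) (by omega)
        rw [pvDedup_cons_of_not_mem cur (v :: rest) hcur_not]
        have hcount : (v :: rest).count cur = 0 := List.count_eq_zero.mpr hcur_not
        simp only [List.map_cons, hcount, List.append_assoc, List.singleton_append]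
        congr 2
        · simp
        apply List.map_congr_left
        intro w hw
        have hwne : w ≠ cur := by
          intro h; subst h
          exact hcur_not ((pvDedup_sublist _).mem hw)
        by_cases hwv : w = v
        · subst hwv
          simp only [if_true, if_neg hwne, List.count_cons_self, Nat.cast_add, Nat.cast_one]
          have harg : (1:Int) + (rest.count w : Int) = 0 + ((rest.count w : Int) + 1) := by ring
          rw [harg]
        · simp only [if_neg hwv, if_neg hwne, List.count_cons_of_ne (fun h => hwv h.symm)]

theorem formatar_sponto_tug_spec : Claim_equal_formatar_sponto_tug := by
  intro potencias _
  unfold Spec_formatar_sponto_tug formatar_sponto_tug formatar_sponto_tug_alt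
  by_cases hne : potencias = []
  · simp [hne]
  · simp only [if_neg hne]
    have hsne : PySem.List.sorted potencias (fun x => x) true ≠ [] := by
      simpa [PySem.List.sorted_eq_nil_iff] using hne
    obtain ⟨y, t, hyt⟩ := List.exists_cons_of_ne_nil hsne
    rw [hyt]
    -- A side: foldl → map, counter keys → set of values, counts
    rw [PySem.List.foldl_append_singleton_eq_map]
    simp only [PySem.Dict.getD_counter, PySem.Dict.keys_counter, List.nil_append]
    -- B side: run-length closed form
    have hpw : (y :: t).Pairwise (fun a b => b ≤ a) := by
      have h := PySem.List.sorted_pairwise_rev potencias (fun x => x)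
      rwa [hyt] at h
    rw [pvRunsLoop_eq t y 1 [] hpw, List.nil_append]
    -- the sorted-descending distinct keys ARE the dedup of the sorted list
    have hperm : (PySem.List.dedup (y :: t)).Perm (PySem.Set.ofList potencias) := by
      rw [List.perm_ext_iff_of_nodup (PySem.List.nodup_dedup _) (PySem.Set.nodup_ofList _)]
      intro a
      rw [PySem.List.mem_dedup, PySem.Set.mem_ofList,
          ← PySem.List.mem_sorted potencias (fun x => x) true, hyt]
    have hgt : (PySem.List.dedup (y :: t)).Pairwise
        (fun a b => (fun x : Int => x) b < (fun x : Int => x) a) := by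
      have hge : (PySem.List.dedup (y :: t)).Pairwise (fun a b => b ≤ a) :=
        hpw.sublist (pvDedup_sublist _)
      have hnd : (PySem.List.dedup (y :: t)).Pairwise (fun a b => a ≠ b) :=
        PySem.List.nodup_dedup _
      exact (hge.and hnd).imp (fun h => lt_of_le_of_ne h.1 (Ne.symm h.2))
    rw [PySem.List.sorted_rev_eq_of_perm_of_pairwise_gt (PySem.Set.ofList potencias)
        (PySem.List.dedup (y :: t)) (fun x => x) hperm hgt]
    apply congrArg
    apply List.map_congr_left
    intro w hw
    have hp := PySem.List.sorted_perm potencias (fun x => x) true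
    rw [hyt] at hp
    have hc : potencias.count w = (y :: t).count w := (hp.count_eq w).symm
    rw [hc]
    by_cases hwy : w = y
    · subst hwy
      simp only [if_true, List.count_cons_self, Nat.cast_add, Nat.cast_one]
      have harg : ((t.count w : Int) + 1) = 1 + (t.count w : Int) := by ring
      rw [harg]
    · simp only [if_neg hwy, List.count_cons_of_ne (fun h => hwy h.symm), Int.zero_add]
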